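-- pv_equiv track=rewrite | github.com/jmcculloch2018/6111 | stl_parse.py | twos_comp
-- ===== SOURCE A (Python) =====
-- def twos_comp(val):
--     out = ''
--     b = bin(abs(val))[2:]
--     b = "0"*(12-len(b)) + b
--     if val<0:
--         c = [str(1-int(i)) for i in b]
--         for i in c:
--             out+=i
--     else:
--         out = b
--     return out
-- ===== SOURCE B (Python) =====
-- def twos_comp(val):
--     b = bin(abs(val))[2:]
--     L = max(12, len(b))
--     if val >= 0:
--         return b.zfill(L)
--     return bin(((1 << L) - 1) ^ abs(val))[2:].zfill(L)
-- ===== Notes on version B (the rewrite author's own statement) =====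
-- stated objective: idiomatic
-- what changed: B replaces A's per-character list-comprehension flip and string-accumulation loop for negative values by a single bitmask complement (((1 << L) - 1) ^ abs(val)) rendered with bin().zfill(L), and replaces A's manual "0"*(12-len(b)) padding by zfill with width L = max(12, len(b)).
import Mathlib
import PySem

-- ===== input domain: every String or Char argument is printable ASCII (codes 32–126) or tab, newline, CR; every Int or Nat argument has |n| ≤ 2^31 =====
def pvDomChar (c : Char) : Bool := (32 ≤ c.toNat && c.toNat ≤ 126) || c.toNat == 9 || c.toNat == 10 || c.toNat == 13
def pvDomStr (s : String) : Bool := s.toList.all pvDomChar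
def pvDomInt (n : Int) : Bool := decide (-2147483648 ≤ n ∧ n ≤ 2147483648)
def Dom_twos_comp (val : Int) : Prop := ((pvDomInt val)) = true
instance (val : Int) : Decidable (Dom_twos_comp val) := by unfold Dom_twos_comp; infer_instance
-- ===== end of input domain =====

-- B replaces A's per-character flip loop (negative branch) by one bitmask complement
-- (((1 << L) - 1) ^ abs(val)) printed with bin()/zfill, where L = max(12, len(b)).

-- ===== PORT A =====
def twos_comp (val : Int) : String :=
  let out : List Char := []
  let b := PySem.List.slice (PySem.Int.toBinChars0b |val|) (some 2) none  -- bin(abs(val))[2:]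
  let b := List.replicate (12 - b.length) '0' ++ b  -- "0"*(12-len(b)) + b; a negative repeat count is the empty string, as Nat subtraction gives
  if val < 0 then
    -- int(i) never raises here: every i is '0' or '1'; the .getD 0 default is unreachable
    let c := b.map (fun i => PySem.Int.toChars (1 - (PySem.Int.ofChars? [i]).getD 0))
    let out := c.foldl (fun acc s => acc ++ s) out
    String.ofList out
  else
    String.ofList b

-- ===== PORT B =====
def twos_comp_alt (val : Int) : String :=
  let b := PySem.List.slice (PySem.Int.toBinChars0b |val|) (some 2) none  -- bin(abs(val))[2:]
  let L : Nat := max 12 b.length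
  if val ≥ 0 then
    String.ofList (PySem.Chars.zfill b (L : Int))
  else
    String.ofList (PySem.Chars.zfill
      (PySem.List.slice (PySem.Int.toBinChars0b (PySem.Int.bxor (((1:Int) <<< L) - 1) |val|)) (some 2) none)
      (L : Int))

-- ===== PRECONDITION & SPEC =====
def Spec_twos_comp (val : Int) (out : String) : Prop := out = twos_comp_alt val
instance (val : Int) (out : String) : Decidable (Spec_twos_comp val out) := by unfold Spec_twos_comp; infer_instance

-- ===== CLAIM (what is proved, stated in full; the proofs are below) =====
def Claim_equal_twos_comp : Prop := ∀ (val : Int), Dom_twos_comp val → Spec_twos_comp val (twos_comp val)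

-- ===== LEMMAS AND PROOFS =====

-- MSB-first binary digits of n, the value of Nat.toDigits 2 n
def digMSB (n : Nat) : List Char :=
  if _h : n < 2 then [Nat.digitChar n]
  else digMSB (n / 2) ++ [Nat.digitChar (n % 2)]
decreasing_by exact Nat.div_lt_self (by omega) (by omega)

-- fixed-width L MSB-first binary digits of n (n < 2^L)
def bitsFix : Nat → Nat → List Char
  | 0, _ => []
  | L + 1, n => bitsFix L (n / 2) ++ [Nat.digitChar (n % 2)]

lemma toDigitsCore_eq (fuel : Nat) : ∀ (n : Nat) (ds : List Char), 0 < fuel → n < 2 ^ fuel →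
    Nat.toDigitsCore 2 fuel n ds = digMSB n ++ ds := by
  induction fuel with
  | zero => omega
  | succ f ih =>
    intro n ds _ h
    rw [Nat.toDigitsCore]
    by_cases h2 : n / 2 = 0
    · simp only [h2, if_true]
      rw [digMSB]
      have hn2 : n < 2 := by omega
      rw [dif_pos hn2]
      have : n % 2 = n := by omega
      simp [this]
    · simp only [h2, if_false]
      have hf : 0 < f := by
        by_contra hh
        have : f = 0 := by omega
        subst this; simp at h; omega
      have hn : n / 2 < 2 ^ f := by
        have := Nat.pow_succ 2 f
        omega
      rw [ih (n / 2) _ hf hn]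
      conv_rhs => rw [digMSB]
      rw [dif_neg (by omega : ¬ n < 2)]
      simp

lemma toDigits_eq (n : Nat) : Nat.toDigits 2 n = digMSB n := by
  have := toDigitsCore_eq (n + 1) n [] (by omega) (by
    calc n < 2 ^ n := Nat.lt_two_pow_self
    _ ≤ 2 ^ (n + 1) := Nat.pow_le_pow_right (by omega) (by omega))
  simpa [Nat.toDigits] using this

lemma length_bitsFix (L : Nat) : ∀ n, (bitsFix L n).length = L := by
  induction L with
  | zero => intro n; rfl
  | succ L ih => intro n; simp [bitsFix, ih]

lemma digMSB_eq_bitsFix (L : Nat) : ∀ n, 2 ^ L ≤ n → n < 2 ^ (L + 1) → digMSB n = bitsFix (L + 1) n := by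
  induction L with
  | zero =>
    intro n h1 h2
    have : n = 1 := by omega
    subst this
    rw [digMSB]
    rfl
  | succ L ih =>
    intro n h1 h2
    have hp : 0 < 2 ^ L := Nat.two_pow_pos _
    have e1 := Nat.pow_succ 2 L
    have e2 := Nat.pow_succ 2 (L + 1)
    rw [digMSB, dif_neg (by omega : ¬ n < 2)]
    rw [bitsFix]
    rw [ih (n / 2) (by omega) (by omega)]

lemma bitsFix_zero_cons (L : Nat) : ∀ n, n < 2 ^ L → bitsFix (L + 1) n = '0' :: bitsFix L n := by
  induction L with
  | zero =>
    intro n h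
    have hn : n = 0 := by omega
    subst hn
    simp [bitsFix]
    decide
  | succ L ih =>
    intro n h
    have e1 := Nat.pow_succ 2 L
    have : bitsFix (L + 1 + 1) n = bitsFix (L + 1) (n / 2) ++ [Nat.digitChar (n % 2)] := rfl
    rw [this, ih (n / 2) (by omega)]
    rfl

lemma bitsFix_pad (L : Nat) : ∀ L0 n, L0 ≤ L → n < 2 ^ L0 →
    bitsFix L n = List.replicate (L - L0) '0' ++ bitsFix L0 n := by
  induction L with
  | zero =>
    intro L0 n h1 hn
    have h0 : L0 = 0 := by omega
    subst h0
    simp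
  | succ L ih =>
    intro L0 n h1 h2
    by_cases h : L0 = L + 1
    · subst h; simp
    · have hle : L0 ≤ L := by omega
      have hn : n < 2 ^ L := Nat.lt_of_lt_of_le h2 (Nat.pow_le_pow_right (by omega) hle)
      rw [bitsFix_zero_cons L n hn, ih L0 n hle h2]
      have : L + 1 - L0 = (L - L0) + 1 := by omega
      rw [this, List.replicate_succ]
      rfl

lemma digMSB_canon (n L : Nat) (hL : 0 < L) (hn : n < 2 ^ L) :
    List.replicate (L - (digMSB n).length) '0' ++ digMSB n = bitsFix L n := by
  by_cases h0 : n = 0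
  · subst h0
    have hd : digMSB 0 = ['0'] := by rw [digMSB]; simp; decide
    rw [hd]
    rw [bitsFix_pad L 1 0 (by omega) (by omega)]
    rfl
  · have h1 : 2 ^ Nat.log2 n ≤ n := Nat.log2_self_le h0
    have h2 : n < 2 ^ (Nat.log2 n + 1) := Nat.lt_log2_self
    have hd := digMSB_eq_bitsFix (Nat.log2 n) n h1 h2
    have hlen : (digMSB n).length = Nat.log2 n + 1 := by rw [hd, length_bitsFix]
    have hle : Nat.log2 n + 1 ≤ L := by
      by_contra hh
      have : L ≤ Nat.log2 n := by omega
      have := Nat.pow_le_pow_right (show 1 ≤ 2 by omega) this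
      omega
    rw [hlen, hd, bitsFix_pad L (Nat.log2 n + 1) n hle h2]

lemma bitsFix_chars (L : Nat) : ∀ n c, c ∈ bitsFix L n → c = '0' ∨ c = '1' := by
  induction L with
  | zero => intro n c h; simp [bitsFix] at h
  | succ L ih =>
    intro n c h
    simp only [bitsFix, List.mem_append, List.mem_singleton] at h
    rcases h with h | h
    · exact ih _ _ h
    · have : n % 2 = 0 ∨ n % 2 = 1 := by omega
      rcases this with h2 | h2 <;> rw [h, h2] <;> simp [Nat.digitChar]

lemma digMSB_chars (n : Nat) : ∀ c ∈ digMSB n, c = '0' ∨ c = '1' := by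
  by_cases h0 : n = 0
  · subst h0
    rw [digMSB]
    simp
    decide
  · intro c hc
    rw [digMSB_eq_bitsFix (Nat.log2 n) n (Nat.log2_self_le h0) Nat.lt_log2_self] at hc
    exact bitsFix_chars _ _ _ hc

lemma zfill_digits (cs : List Char) (w : Int) (h : ∀ c ∈ cs, c = '0' ∨ c = '1') :
    PySem.Chars.zfill cs w = List.replicate (w.toNat - cs.length) '0' ++ cs := by
  rcases cs with _ | ⟨c, rest⟩
  · simp only [PySem.Chars.zfill.eq_def]
    split_ifs with hw
    · have h0 : w.toNat = 0 := by simp at hw; omega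
      simp [h0]
    · simp
  · have hc : ¬(c = '+' ∨ c = '-') := by
      rcases h c (by simp) with h1 | h1 <;> subst h1 <;> decide
    simp only [PySem.Chars.zfill.eq_def]
    by_cases hw : w ≤ ((c :: rest).length : Int)
    · rw [if_pos hw]
      have h0 : w.toNat - (c :: rest).length = 0 := by omega
      rw [h0, List.replicate_zero, List.nil_append]
    · rw [if_neg hw]
      simp [hc]

lemma xor_two_bit (a c : Nat) (b d : Bool) :
    (2 * a + b.toNat) ^^^ (2 * c + d.toNat) = 2 * (a ^^^ c) + (b != d).toNat := by
  simpa [Nat.bit_val] using Nat.xor_bit b a d c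

lemma mask_xor (L : Nat) : ∀ n, n < 2 ^ L → (2 ^ L - 1) ^^^ n = 2 ^ L - 1 - n := by
  induction L with
  | zero =>
    intro n h
    have hn : n = 0 := by omega
    subst hn
    rfl
  | succ L ih =>
    intro n h
    have hp : 0 < 2 ^ L := Nat.two_pow_pos _
    have e1 := Nat.pow_succ 2 L
    have hm : 2 ^ (L + 1) - 1 = 2 * (2 ^ L - 1) + (true : Bool).toNat := by
      simp [Bool.toNat]; omega
    have hn : n = 2 * (n / 2) + (decide (n % 2 = 1) : Bool).toNat := by
      rcases Nat.mod_two_eq_zero_or_one n with h2 | h2 <;> simp [h2] <;> omega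
    rw [hm]
    conv_lhs => rw [hn]
    rw [xor_two_bit, ih (n / 2) (by omega)]
    rcases Nat.mod_two_eq_zero_or_one n with h2 | h2 <;> simp [h2, Bool.toNat] <;> omega

lemma flip_flatMap (L : Nat) : ∀ n, n < 2 ^ L →
    (bitsFix L n).flatMap (fun i => PySem.Int.toChars (1 - (PySem.Int.ofChars? [i]).getD 0))
      = bitsFix L (2 ^ L - 1 - n) := by
  induction L with
  | zero => intro n h; rfl
  | succ L ih =>
    intro n h
    have hp : 0 < 2 ^ L := Nat.two_pow_pos _
    have e1 := Nat.pow_succ 2 L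
    have hq : (2 ^ (L + 1) - 1 - n) / 2 = 2 ^ L - 1 - n / 2 := by omega
    have hr : (2 ^ (L + 1) - 1 - n) % 2 = 1 - n % 2 := by omega
    show (bitsFix L (n / 2) ++ [Nat.digitChar (n % 2)]).flatMap _ = _
    rw [List.flatMap_append, ih (n / 2) (by omega)]
    have hlast : ∀ r, r < 2 → [Nat.digitChar r].flatMap
        (fun i => PySem.Int.toChars (1 - (PySem.Int.ofChars? [i]).getD 0)) = [Nat.digitChar (1 - r)] := by
      intro r hr2
      interval_cases r <;> decide
    rw [hlast (n % 2) (by omega)]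
    show _ = bitsFix L ((2 ^ (L + 1) - 1 - n) / 2) ++ [Nat.digitChar ((2 ^ (L + 1) - 1 - n) % 2)]
    rw [hq, hr]

lemma bin_slice (v : Int) (h : 0 ≤ v) :
    PySem.List.slice (PySem.Int.toBinChars0b v) (some 2) none = digMSB v.toNat := by
  rw [PySem.Int.toBinChars0b, if_neg (by omega)]
  rw [PySem.List.slice_from _ (by omega : (0:Int) ≤ 2)]
  show Nat.toDigits 2 v.toNat = digMSB v.toNat
  exact toDigits_eq _

lemma shift_mask (L : Nat) : ((1:Int) <<< L) - 1 = ((2 ^ L - 1 : Nat) : Int) := by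
  rw [Int.shiftLeft_eq]
  rw [Nat.cast_sub (Nat.one_le_two_pow)]
  push_cast
  ring

-- ===== VERDICT (by name: the statement is the Claim_ definition above) =====
theorem twos_comp_spec : Claim_equal_twos_comp := by
  intro val _
  unfold Spec_twos_comp twos_comp twos_comp_alt
  simp only []
  set m : Nat := val.natAbs with hm
  have habs : |val| = (m : Int) := by rw [hm]; exact Int.abs_eq_natAbs val
  have hb : PySem.List.slice (PySem.Int.toBinChars0b |val|) (some 2) none = digMSB m := by
    rw [habs, bin_slice _ (by positivity)]
    simp
  rw [hb]
  set b := digMSB m with hbdef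
  set L : Nat := max 12 b.length with hL
  have hL0 : 0 < L := by omega
  have hlen : b.length ≤ L := by omega
  have hmL : m < 2 ^ L := by
    by_cases h0 : m = 0
    · have := Nat.two_pow_pos L
      omega
    · have h2 : m < 2 ^ (Nat.log2 m + 1) := Nat.lt_log2_self
      have hl : b.length = Nat.log2 m + 1 := by
        rw [hbdef, digMSB_eq_bitsFix (Nat.log2 m) m (Nat.log2_self_le h0) h2, length_bitsFix]
      calc m < 2 ^ (Nat.log2 m + 1) := h2
        _ ≤ 2 ^ L := Nat.pow_le_pow_right (by omega) (by omega)
  have hrep : 12 - b.length = L - b.length := by omega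
  have hpad : List.replicate (12 - b.length) '0' ++ b = bitsFix L m := by
    rw [hrep, hbdef]
    exact digMSB_canon m L hL0 hmL
  by_cases hv : val < 0
  · rw [if_pos hv, if_neg (by omega : ¬ val ≥ 0)]
    -- A side: fold-append of the flipped characters
    rw [hpad]
    have hfold : ∀ (c : List (List Char)), c.foldl (fun acc s => acc ++ s) [] = c.flatMap (fun s => s) := by
      intro c
      simpa using PySem.List.foldl_append_eq_flatMap (fun (s : List Char) => s) c []
    rw [hfold]
    have hmapflat : ((bitsFix L m).map
        (fun i => PySem.Int.toChars (1 - (PySem.Int.ofChars? [i]).getD 0))).flatMap (fun s => s)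
        = (bitsFix L m).flatMap (fun i => PySem.Int.toChars (1 - (PySem.Int.ofChars? [i]).getD 0)) := by
      simp [List.flatMap_def, Function.comp_def]
    rw [hmapflat, flip_flatMap L m hmL]
    -- B side
    have hxor : PySem.Int.bxor ((1:Int) <<< L - 1) |val| = ((2 ^ L - 1 - m : Nat) : Int) := by
      rw [shift_mask, habs, PySem.Int.bxor_natCast, mask_xor L m hmL]
    rw [hxor, bin_slice _ (by positivity)]
    have htoNat : ((2 ^ L - 1 - m : Nat) : Int).toNat = 2 ^ L - 1 - m := by simp
    rw [htoNat]
    have hflt : 2 ^ L - 1 - m < 2 ^ L := by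
      have := Nat.two_pow_pos L
      omega
    rw [zfill_digits _ _ (digMSB_chars _)]
    have ht : ((L : Int)).toNat = L := by simp
    rw [ht]
    have := digMSB_canon (2 ^ L - 1 - m) L hL0 hflt
    rw [this]
  · rw [if_neg hv, if_pos (by omega : val ≥ 0)]
    rw [zfill_digits _ _ (digMSB_chars _)]
    have ht : ((L : Int)).toNat = L := by simp
    rw [ht, ← hrep, hbdef]
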